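-- pv_equiv track=rewrite | github.com/gdawg32/Playwise | ml_pipeline/features/make_features.py | compute_league_positions
-- ===== SOURCE A (Python) =====
-- def compute_league_positions(points_dict, goal_diff_dict, goals_scored_dict):
--     teams = list(points_dict.keys())
--     # ensure presence
--     for t in teams:
--         points_dict.setdefault(t, 0)
--         goal_diff_dict.setdefault(t, 0)
--         goals_scored_dict.setdefault(t, 0)
--     # sort by points desc, goal diff desc, goals scored desc, team name asc
--     standings = sorted(teams, key=lambda t: (-points_dict.get(t,0), -goal_diff_dict.get(t,0), -goals_scored_dict.get(t,0), t))
--     pos = {team: rank+1 for rank, team in enumerate(standings)}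
--     return pos
-- ===== SOURCE B (Python) =====
-- def compute_league_positions(points_dict, goal_diff_dict, goals_scored_dict):
--     teams = list(points_dict.keys())
--     # ensure presence
--     for t in teams:
--         points_dict.setdefault(t, 0)
--         goal_diff_dict.setdefault(t, 0)
--         goals_scored_dict.setdefault(t, 0)
--
--     def key(t):
--         return (-points_dict.get(t, 0), -goal_diff_dict.get(t, 0),
--                 -goals_scored_dict.get(t, 0), t)
--
--     # rank-placement sort: keys are distinct (team names are unique dict keys),
--     # so each team's slot in the table is the number of strictly smaller keys
--     keys = [key(t) for t in teams]
--     standings = [None] * len(teams)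
--     for t, kt in zip(teams, keys):
--         standings[sum(1 for k in keys if k < kt)] = t
--     return {team: rank + 1 for rank, team in enumerate(standings)}
-- ===== Notes on version B (the rewrite author's own statement) =====
-- stated objective: alternative
-- what changed: Replaces the comparison sort by a rank-placement (counting) sort: each team is placed directly at the index equal to the number of teams with a strictly smaller key tuple; the presence setdefault mutations on the argument dicts are the same in both.
import Mathlib
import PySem

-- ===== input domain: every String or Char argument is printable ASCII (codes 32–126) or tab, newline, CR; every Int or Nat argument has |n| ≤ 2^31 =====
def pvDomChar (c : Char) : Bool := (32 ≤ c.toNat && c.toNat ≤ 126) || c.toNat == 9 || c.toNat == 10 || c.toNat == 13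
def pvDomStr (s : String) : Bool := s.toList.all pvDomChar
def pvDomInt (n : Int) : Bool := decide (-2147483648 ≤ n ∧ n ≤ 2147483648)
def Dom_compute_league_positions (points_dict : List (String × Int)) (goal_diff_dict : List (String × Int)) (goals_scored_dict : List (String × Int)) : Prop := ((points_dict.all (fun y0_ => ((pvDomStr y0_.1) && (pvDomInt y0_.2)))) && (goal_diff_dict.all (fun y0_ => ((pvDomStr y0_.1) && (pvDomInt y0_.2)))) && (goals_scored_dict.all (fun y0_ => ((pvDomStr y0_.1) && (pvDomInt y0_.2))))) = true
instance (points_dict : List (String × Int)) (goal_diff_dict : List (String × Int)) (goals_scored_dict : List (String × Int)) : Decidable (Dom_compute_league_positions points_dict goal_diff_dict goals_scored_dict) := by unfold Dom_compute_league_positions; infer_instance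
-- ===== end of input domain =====

-- B replaces A's comparison sort by a rank-placement (counting) sort: each team goes straight to
-- the slot equal to the number of teams with a strictly smaller key tuple; equal return value.
-- Both A and B perform the same setdefault presence mutations on the argument dicts
-- (observable side effect, identical in both).

-- ===== PORT A =====
-- the sort-key type: Python's 4-tuple (-points, -goal_diff, -goals_scored, name), compared lexicographically
abbrev pvK : Type := Lex (Int × Lex (Int × Lex (Int × String)))

-- Python's tuple '<' on pvK, hand-ported (exact on Int/String components; Mathlib's derived
-- Decidable instance for nested Lex does not evaluate in the interpreter, so we supply our own)
def pvKeyLt (a b : pvK) : Bool :=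
  match a, b with
  | (a1, a2, a3, a4), (b1, b2, b3, b4) =>
    if a1 = b1 then
      if a2 = b2 then
        if a3 = b3 then decide (a4 < b4) else decide (a3 < b3)
      else decide (a2 < b2)
    else decide (a1 < b1)

lemma pv_ofLex_pair {α β : Type} (x : α) (y : β) : (ofLex ((x, y) : Lex (α × β))) = (x, y) := rfl

lemma pvKeyLt_iff (a b : pvK) : pvKeyLt a b = true ↔ a < b := by
  obtain ⟨a1, a2, a3, a4⟩ := a
  obtain ⟨b1, b2, b3, b4⟩ := b
  simp only [pvKeyLt, Prod.Lex.lt_iff]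
  split_ifs <;> simp_all [pv_ofLex_pair]

-- decidability witness for the lex order, used by both ports (cited by the sorted call)
@[reducible] def pvKeyDec : DecidableLT pvK := fun a b => decidable_of_iff (pvKeyLt a b = true) (pvKeyLt_iff a b)

def compute_league_positions (points_dict : List (String × Int)) (goal_diff_dict : List (String × Int)) (goals_scored_dict : List (String × Int)) : List (String × Int) :=
  let pd0 := PySem.Dict.ofList points_dict
  let teams := pd0.keys
  -- ensure presence (setdefault loop; mutations of the three dicts)
  let pd := teams.foldl (fun d t => d.setdefault t 0) pd0
  let gdd := teams.foldl (fun d t => d.setdefault t 0) (PySem.Dict.ofList goal_diff_dict)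
  let gsd := teams.foldl (fun d t => d.setdefault t 0) (PySem.Dict.ofList goals_scored_dict)
  let key : String → pvK := fun t =>
    ((-(pd.getD t 0), -(gdd.getD t 0), -(gsd.getD t 0), t) : pvK)
  let standings := @PySem.List.sorted String pvK _ pvKeyDec teams key false
  -- pos = {team: rank+1 for rank, team in enumerate(standings)}
  ((PySem.List.enumerate standings 0).foldl (fun d p => d.insert p.2 (p.1 + 1)) PySem.Dict.empty).items

-- ===== PORT B =====
def compute_league_positions_alt (points_dict : List (String × Int)) (goal_diff_dict : List (String × Int)) (goals_scored_dict : List (String × Int)) : List (String × Int) :=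
  let pd0 := PySem.Dict.ofList points_dict
  let teams := pd0.keys
  -- same presence loop as A
  let pd := teams.foldl (fun d t => d.setdefault t 0) pd0
  let gdd := teams.foldl (fun d t => d.setdefault t 0) (PySem.Dict.ofList goal_diff_dict)
  let gsd := teams.foldl (fun d t => d.setdefault t 0) (PySem.Dict.ofList goals_scored_dict)
  let key : String → pvK := fun t =>
    ((-(pd.getD t 0), -(gdd.getD t 0), -(gsd.getD t 0), t) : pvK)
  -- keys = [key(t) for t in teams]; standings = [None]*n; standings[#{k in keys | k < kt}] = t
  let ks := teams.map key
  let standings := (teams.zip ks).foldl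
    (fun o p => o.set (ks.countP (fun k => pvKeyLt k p.2)) p.1)
    (List.replicate teams.length "")
  ((PySem.List.enumerate standings 0).foldl (fun d p => d.insert p.2 (p.1 + 1)) PySem.Dict.empty).items

-- ===== PRECONDITION & SPEC =====
def Spec_compute_league_positions (points_dict : List (String × Int)) (goal_diff_dict : List (String × Int)) (goals_scored_dict : List (String × Int)) (out : List (String × Int)) : Prop := out = compute_league_positions_alt points_dict goal_diff_dict goals_scored_dict
instance (points_dict : List (String × Int)) (goal_diff_dict : List (String × Int)) (goals_scored_dict : List (String × Int)) (out : List (String × Int)) : Decidable (Spec_compute_league_positions points_dict goal_diff_dict goals_scored_dict out) := by unfold Spec_compute_league_positions; infer_instance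

-- ===== CLAIM (what is proved, stated in full; the proofs are below) =====
def Claim_equal_compute_league_positions : Prop := ∀ (points_dict : List (String × Int)) (goal_diff_dict : List (String × Int)) (goals_scored_dict : List (String × Int)), Dom_compute_league_positions points_dict goal_diff_dict goals_scored_dict → Spec_compute_league_positions points_dict goal_diff_dict goals_scored_dict (compute_league_positions points_dict goal_diff_dict goals_scored_dict)

-- ===== LEMMAS AND PROOFS =====

-- In a strictly key-increasing list, the element at index i has exactly i strictly-smaller keys.
lemma pv_countP_lt_eq_index {K : Type} [LinearOrder K] (k : String → K) :
    ∀ (l : List String), l.Pairwise (fun a b => k a < k b) → ∀ i (h : i < l.length),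
      ∀ (x : String), x = l[i] → l.countP (fun s => decide (k s < k x)) = i := by
  intro l
  induction l with
  | nil => intro _ i h; simp at h
  | cons a l ih =>
    intro hp i h x hx
    rw [List.pairwise_cons] at hp
    cases i with
    | zero =>
      simp only [List.getElem_cons_zero] at hx
      subst hx
      rw [List.countP_eq_zero]
      intro s hs
      simp only [decide_eq_true_eq]
      rcases List.mem_cons.1 hs with rfl | hs'
      · exact lt_irrefl _
      · exact not_lt.2 (le_of_lt (hp.1 s hs'))
    | succ i =>
      have hil : i < l.length := Nat.lt_of_succ_lt_succ (by simpa using h)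
      have hx' : x = l[i]'hil := by simpa using hx
      have hxm : x ∈ l := hx' ▸ List.getElem_mem _
      rw [List.countP_cons, ih hp.2 i hil x hx']
      simp [hp.1 _ hxm]

-- sorted with an injective key over a Nodup list is strictly increasing
lemma pv_sorted_pairwise_lt {K : Type} [LinearOrder K] (k : String → K)
    (hinj : Function.Injective k) (teams : List String) (hnd : teams.Nodup) :
    (PySem.List.sorted teams k false).Pairwise (fun a b => k a < k b) := by
  have h1 := PySem.List.sorted_pairwise teams k
  have h2 : (PySem.List.sorted teams k false).Nodup :=
    ((PySem.List.sorted_perm teams k false).nodup_iff).2 hnd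
  exact (h1.and h2).imp (fun {a b} hab => lt_of_le_of_ne hab.1 (fun e => hab.2 (hinj e)))

-- placing each element of b at its enumerated slot reconstructs b
lemma pv_foldl_set_enum (g : String → Nat) :
    ∀ (b a : List String), (∀ j (h : j < b.length), g b[j] = a.length + j) →
      b.foldl (fun o t => o.set (g t) t) (a ++ List.replicate b.length "") = a ++ b := by
  intro b
  induction b with
  | nil => intro a _; simp
  | cons t b ih =>
    intro a hg
    have hgt : g t = a.length := by simpa using hg 0 (by simp)
    have hset : (a ++ List.replicate (b.length + 1) "").set (g t) t
        = (a ++ [t]) ++ List.replicate b.length "" := by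
      rw [hgt, List.set_append]
      simp [List.replicate_succ]
    simp only [List.length_cons, List.foldl_cons, hset]
    have hg' : ∀ j (h : j < b.length), g b[j] = (a ++ [t]).length + j := by
      intro j hj
      have := hg (j + 1) (by simpa using Nat.succ_lt_succ hj)
      simpa [Nat.add_assoc, Nat.add_comm 1 j] using this
    rw [ih (a ++ [t]) hg']
    simp

-- counting-and-placing (abstract slot function g) equals sorting
lemma pv_core_abs {K : Type} [LinearOrder K] (k : String → K) (hinj : Function.Injective k)
    (teams : List String) (hnd : teams.Nodup) (g : String → Nat)
    (hgc : ∀ t, g t = teams.countP (fun s => decide (k s < k t))) :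
    teams.foldl (fun o t => o.set (g t) t) (List.replicate teams.length "")
      = PySem.List.sorted teams k false := by
  have hperm : (PySem.List.sorted teams k false).Perm teams := PySem.List.sorted_perm teams k false
  have hpw := pv_sorted_pairwise_lt k hinj teams hnd
  have hg : ∀ j (h : j < (PySem.List.sorted teams k false).length),
      g ((PySem.List.sorted teams k false)[j]) = j := by
    intro j hj
    rw [hgc, ← hperm.countP_eq]
    exact pv_countP_lt_eq_index k _ hpw j hj _ rfl
  have hginj : ∀ x ∈ teams, ∀ y ∈ teams, g x = g y → x = y := by
    intro x hx y hy hxy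
    obtain ⟨i, hi, hxi⟩ := List.mem_iff_getElem.1 (hperm.mem_iff.2 hx)
    obtain ⟨j, hj, hyj⟩ := List.mem_iff_getElem.1 (hperm.mem_iff.2 hy)
    have hij : i = j := by rw [← hg i hi, ← hg j hj, hxi, hyj, hxy]
    subst hij
    rw [← hxi, ← hyj]
  have hcomm : ∀ x ∈ teams, ∀ y ∈ teams, ∀ (z : List String),
      (z.set (g x) x).set (g y) y = (z.set (g y) y).set (g x) x := by
    intro x hx y hy z
    by_cases hxy : x = y
    · subst hxy; rfl
    · exact List.set_comm _ _ (fun h => hxy (hginj x hx y hy h))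
  have hlen : teams.length = (PySem.List.sorted teams k false).length := hperm.length_eq.symm
  rw [List.Perm.foldl_eq' hperm.symm hcomm]
  have h2 := pv_foldl_set_enum g (PySem.List.sorted teams k false) []
    (by intro j hj; simpa using hg j hj)
  rw [hlen]
  exact h2

-- any two decidability witnesses for the order coincide
lemma pv_dec_eq {K : Type} [LT K] (d1 d2 : DecidableLT K) : d1 = d2 := by
  funext a b; exact Subsingleton.elim _ _

-- the B-port fold equals sorting
lemma pv_core {K : Type} [LinearOrder K] (dec : DecidableLT K) (k : String → K)
    (hinj : Function.Injective k) (teams : List String) (hnd : teams.Nodup) :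
    teams.foldl (fun o t => o.set (teams.countP (fun s => @decide _ (dec (k s) (k t)))) t)
        (List.replicate teams.length "")
      = @PySem.List.sorted String K _ dec teams k false := by
  rw [pv_dec_eq dec (LinearOrder.toDecidableLT)]
  exact pv_core_abs k hinj teams hnd _ (fun t => rfl)

-- folding over the zipped (team, key) pairs with counts over the key list is the direct count fold
lemma pv_zip_keys {K : Type} (lt : K → K → Bool) (k : String → K) (teams : List String) (init : List String) :
    (teams.zip (teams.map k)).foldl
        (fun o p => o.set ((teams.map k).countP (fun x => lt x p.2)) p.1) init
      = teams.foldl (fun o t => o.set (teams.countP (fun s => lt (k s) (k t))) t) init := by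
  have hz : teams.zip (teams.map k) = teams.map (fun t => (t, k t)) := by
    induction teams with
    | nil => rfl
    | cons a l ih => simp [ih]
  rw [hz, List.foldl_map]
  simp only [List.countP_map, Function.comp_def]

-- the hand-written comparison is the decide of pvKeyDec (definitionally)
lemma pvKeyLt_eq_decide (a b : pvK) : pvKeyLt a b = @decide _ (pvKeyDec a b) := by
  by_cases h : a < b
  · simp [h, (pvKeyLt_iff a b).2 h]
  · have h2 : pvKeyLt a b = false := by
      cases hb : pvKeyLt a b
      · rfl
      · exact absurd ((pvKeyLt_iff a b).1 hb) h
    simp [h, h2]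

-- the concrete sort key is injective (its last component is the team name itself)
lemma pv_key_inj (pd gdd gsd : PySem.Dict String Int) :
    Function.Injective (fun t : String =>
      ((-(pd.getD t 0), -(gdd.getD t 0), -(gsd.getD t 0), t) : pvK)) := by
  intro x y h
  have := congrArg (fun z : pvK => (ofLex (ofLex (ofLex z).2).2).2) h
  simpa [pv_ofLex_pair] using this

-- ===== VERDICT (by name: the statement is the Claim_ definition above) =====
set_option maxRecDepth 4000 in
theorem compute_league_positions_spec : Claim_equal_compute_league_positions := by
  intro points_dict goal_diff_dict goals_scored_dict _
  unfold Spec_compute_league_positions compute_league_positions compute_league_positions_alt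
  dsimp only
  have hnd : (PySem.Dict.ofList points_dict).keys.Nodup :=
    PySem.Dict.nodup_keys_ofList points_dict
  have hfun : pvKeyLt = fun a b => @decide _ (pvKeyDec a b) :=
    funext fun a => funext fun b => pvKeyLt_eq_decide a b
  rw [hfun]
  rw [pv_zip_keys (fun a b => @decide _ (pvKeyDec a b))]
  rw [pv_core pvKeyDec _ (pv_key_inj _ _ _) _ hnd]
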